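-- pv_equiv track=rewrite | github.com/wvw321/algorithms_tasks | yandex/Тренировки по алгоритмам 5.0/дз 1/F.py | count
-- ===== SOURCE A (Python) =====
-- def count(a: list):
--     trigger = False
--     answer = []
--     for i in range(0, len(a) - 1):
--         if trigger:
--             if a[i + 1] % 2 != 0:
--                 answer.append("x")
--
--             else:
--                 answer.append("+")
--
--         else:
--             if a[i] % 2 != 0:
--                 trigger = True
--                 if a[i + 1] % 2 != 0:
--                     answer.append("x")
--
--                 else:
--                     answer.append("+")
--             else:
--                 answer.append("+")
--
--     return answer
-- ===== SOURCE B (Python) =====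
-- def count(a: list):
--     n = len(a)
--     if n <= 1:
--         return []
--     j = 0
--     for x in a[:-1]:
--         if x % 2 != 0:
--             break
--         j += 1
--     return ["+"] * j + ["x" if y % 2 != 0 else "+" for y in a[j + 1:]]
-- ===== Notes on version B (the rewrite author's own statement) =====
-- stated objective: alternative
-- what changed: Replaces A's single pass with a sticky trigger flag by a locate-then-build decomposition: first find j, the count of leading even elements of a[:-1], then construct the answer as j '+' symbols followed by a parity map over a[j+1:].
import Mathlib
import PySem

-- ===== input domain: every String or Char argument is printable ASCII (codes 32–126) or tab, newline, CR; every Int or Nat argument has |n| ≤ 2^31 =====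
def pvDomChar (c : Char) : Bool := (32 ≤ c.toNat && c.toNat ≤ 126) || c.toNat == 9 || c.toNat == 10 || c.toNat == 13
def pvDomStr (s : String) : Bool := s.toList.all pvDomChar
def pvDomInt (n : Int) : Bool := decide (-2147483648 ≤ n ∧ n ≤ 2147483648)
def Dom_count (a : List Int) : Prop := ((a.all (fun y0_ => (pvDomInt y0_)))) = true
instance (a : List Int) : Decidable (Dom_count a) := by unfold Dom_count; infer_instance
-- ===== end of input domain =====

-- B replaces A's sticky-flag single pass by locate-the-first-odd-trigger then replicate+map (alternative decomposition, same cost).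


-- ===== PORT A =====
-- A's index loop 'for i in range(0, len(a)-1)' reading a[i] and a[i+1] rendered as the
-- obvious structural recursion over the list, threading the same (trigger, answer) state;
-- the 'if trigger / else' branch split is the outer Bool pattern.
def countGo : List Int → Bool → List String → List String
  | _ :: y :: rest, true, answer =>
      if PySem.Int.mod y 2 ≠ 0 then countGo (y :: rest) true (answer ++ ["x"])
      else countGo (y :: rest) true (answer ++ ["+"])
  | x :: y :: rest, false, answer =>
      if PySem.Int.mod x 2 ≠ 0 then
        if PySem.Int.mod y 2 ≠ 0 then countGo (y :: rest) true (answer ++ ["x"])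
        else countGo (y :: rest) true (answer ++ ["+"])
      else countGo (y :: rest) false (answer ++ ["+"])
  | _, _, answer => answer

def count (a : List Int) : List String := countGo a false []

-- ===== PORT B =====
-- 'j = 0; for x in a[:-1]: if x % 2 != 0: break; j += 1'
def foLoop : List Int → Nat
  | [] => 0
  | x :: t => if PySem.Int.mod x 2 ≠ 0 then 0 else foLoop t + 1

def count_alt (a : List Int) : List String :=
  if a.length ≤ 1 then []
  else
    let j := foLoop (PySem.List.slice a none (some (-1)))
    List.replicate j "+" ++
      (PySem.List.slice a (some ((j : Int) + 1)) none).map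
        (fun y => if PySem.Int.mod y 2 ≠ 0 then "x" else "+")

-- ===== PRECONDITION & SPEC =====
def Spec_count (a : List Int) (out : List String) : Prop := out = count_alt a
instance (a : List Int) (out : List String) : Decidable (Spec_count a out) := by unfold Spec_count; infer_instance

-- ===== CLAIM (what is proved, stated in full; the proofs are below) =====
def Claim_equal_count : Prop := ∀ (a : List Int), Dom_count a → Spec_count a (count a)

-- ===== LEMMAS AND PROOFS =====

-- the per-element symbol appended once the trigger is set
def pvSym (y : Int) : String := if PySem.Int.mod y 2 ≠ 0 then "x" else "+"

lemma pvSym_odd (y : Int) (h : PySem.Int.mod y 2 ≠ 0) : pvSym y = "x" := if_pos h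
lemma pvSym_even (y : Int) (h : ¬ PySem.Int.mod y 2 ≠ 0) : pvSym y = "+" := if_neg h

lemma countGo_acc (l : List Int) : ∀ trig ans, countGo l trig ans = ans ++ countGo l trig [] := by
  induction l with
  | nil => intro trig ans; cases trig <;> simp [countGo]
  | cons x t ih =>
    intro trig ans
    cases t with
    | nil => cases trig <;> simp [countGo]
    | cons y r =>
      cases trig <;> simp only [countGo] <;> split_ifs <;>
        (conv_rhs => rw [ih]) <;> rw [ih] <;> simp

lemma countGo_true (l : List Int) : ∀ ans, countGo l true ans = ans ++ (l.drop 1).map pvSym := by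
  induction l with
  | nil => intro ans; simp [countGo]
  | cons x t ih =>
    intro ans
    cases t with
    | nil => simp [countGo]
    | cons y r =>
      simp only [countGo]
      split_ifs with h
      · rw [ih]; simp [pvSym_odd y h]
      · rw [ih]; simp [pvSym_even y h]

lemma count_odd_head (x : Int) (t : List Int) (ht : t ≠ []) (hx : PySem.Int.mod x 2 ≠ 0) :
    count (x :: t) = t.map pvSym := by
  cases t with
  | nil => exact absurd rfl ht
  | cons y r =>
    show countGo (x :: y :: r) false [] = _
    simp only [countGo]
    rw [if_pos hx]
    split_ifs with hy
    · rw [countGo_true]; simp [pvSym_odd y hy]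
    · rw [countGo_true]; simp [pvSym_even y hy]

lemma count_even_head (x : Int) (t : List Int) (ht : t ≠ []) (hx : ¬ PySem.Int.mod x 2 ≠ 0) :
    count (x :: t) = "+" :: count t := by
  cases t with
  | nil => exact absurd rfl ht
  | cons y r =>
    show countGo (x :: y :: r) false [] = _
    simp only [countGo]
    rw [if_neg hx, countGo_acc]
    rfl

-- count_alt without slices and casts: replicate the even prefix, map the rest
lemma count_alt_eq (a : List Int) (h : 2 ≤ a.length) :
    count_alt a =
      List.replicate (foLoop a.dropLast) "+" ++ (a.drop (foLoop a.dropLast + 1)).map pvSym := by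
  simp only [count_alt]
  rw [if_neg (by omega), PySem.List.slice_to_neg_one]
  have hc : ((foLoop a.dropLast : Int) + 1) = ((foLoop a.dropLast + 1 : Nat) : Int) := by
    push_cast; ring
  rw [hc, PySem.List.slice_from_natCast]
  rfl

lemma count_alt_odd_head (x : Int) (t : List Int) (ht : t ≠ []) (hx : PySem.Int.mod x 2 ≠ 0) :
    count_alt (x :: t) = t.map pvSym := by
  cases t with
  | nil => exact absurd rfl ht
  | cons y r =>
    rw [count_alt_eq _ (by simp), List.dropLast_cons_of_ne_nil (by simp : (y :: r) ≠ [])]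
    simp only [foLoop]
    rw [if_pos hx]
    simp

lemma count_alt_even_head (x : Int) (t : List Int) (ht : t ≠ []) (hx : ¬ PySem.Int.mod x 2 ≠ 0) :
    count_alt (x :: t) = "+" :: count_alt t := by
  cases t with
  | nil => exact absurd rfl ht
  | cons y r =>
    rw [count_alt_eq _ (by simp), List.dropLast_cons_of_ne_nil (by simp : (y :: r) ≠ [])]
    simp only [foLoop]
    rw [if_neg hx]
    cases r with
    | nil => simp [count_alt, foLoop]
    | cons z s =>
      rw [count_alt_eq (y :: z :: s) (by simp)]
      simp [List.replicate_succ]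

lemma count_eq_alt (a : List Int) : count a = count_alt a := by
  induction a with
  | nil => simp [count, countGo, count_alt]
  | cons x t ih =>
    cases t with
    | nil => simp [count, countGo, count_alt]
    | cons y r =>
      by_cases hx : PySem.Int.mod x 2 ≠ 0
      · rw [count_odd_head x _ (by simp) hx, count_alt_odd_head x _ (by simp) hx]
      · rw [count_even_head x _ (by simp) hx, count_alt_even_head x _ (by simp) hx, ih]

-- ===== VERDICT (by name: the statement is the Claim_ definition above) =====
theorem count_spec : Claim_equal_count := by
  intro a _
  unfold Spec_count
  exact count_eq_alt a
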